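-- pv_equiv track=rewrite | github.com/Aa-Aanegola/Wiki-Search-Engine | indexer/boa.py | parse
-- ===== SOURCE A (Python) =====
-- from collections import defaultdict
--
-- def parse(posting):
--     sel = 'id'
--     prev = 0
--     dic = defaultdict()
--     for i in range(len(posting)):
--         if posting[i].isdigit() or (posting[i]>='a' and posting[i]<='f'):
--             continue
--         dic[sel] = int(posting[prev:i], 16)
--         sel = posting[i]
--         prev = i+1
--     dic[sel] = int(posting[prev:len(posting)], 16)
--     return dic
-- ===== SOURCE B (Python) =====
-- from collections import defaultdict
--
-- def parse(posting):
--     # Two-phase: tokenize into parallel key/segment lists, then assign in one zip pass.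
--     keys = ['id']
--     segs = []
--     cur = ''
--     for ch in posting:
--         if ch.isdigit() or 'a' <= ch <= 'f':
--             cur += ch
--         else:
--             segs.append(cur)
--             keys.append(ch)
--             cur = ''
--     segs.append(cur)
--     dic = defaultdict()
--     for k, s in zip(keys, segs):
--         dic[k] = int(s, 16)
--     return dic
-- ===== Notes on version B (the rewrite author's own statement) =====
-- stated objective: idiomatic
-- what changed: A builds the dict inline during an index-based scan with manual slicing posting[prev:i]; B first tokenizes the string into parallel key/segment lists in one char pass (no indices or slices), then assigns them into the dict in a separate zip pass.
-- outside the precondition, e.g. on parse(''): A raises ValueError, B raises ValueError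
import Mathlib
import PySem

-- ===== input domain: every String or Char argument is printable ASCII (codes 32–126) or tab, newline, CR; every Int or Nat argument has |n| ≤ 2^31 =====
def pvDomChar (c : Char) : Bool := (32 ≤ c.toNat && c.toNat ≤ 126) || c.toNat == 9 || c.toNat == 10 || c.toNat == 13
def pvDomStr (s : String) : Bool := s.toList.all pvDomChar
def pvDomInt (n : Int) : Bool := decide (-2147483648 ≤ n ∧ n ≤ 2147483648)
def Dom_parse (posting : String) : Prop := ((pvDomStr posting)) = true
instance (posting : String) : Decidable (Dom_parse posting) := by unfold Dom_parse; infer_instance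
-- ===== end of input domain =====

-- B re-decomposes A's index-and-slice scan as tokenize-then-assign (idiomatic two-phase); same results, A raises on empty hex segments (excluded by Pre_).

-- ===== PORT A =====
-- posting[i].isdigit() or ('a' <= posting[i] <= 'f'): exact on ASCII (Dom), char comparison by code.
def pvIsHex (c : Char) : Bool := PySem.Chars.isdigit c || ('a' ≤ c && c ≤ 'f')

-- int(s, 16) for the nonempty lowercase-hex segments that reach it under Pre_ (exact there).
def pvIntHex (s : List Char) : Int :=
  s.foldl (fun a c => a * 16 + (if PySem.Chars.isdigit c then (c.toNat : Int) - 48 else (c.toNat : Int) - 97 + 10)) 0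

-- A's loop body: state (sel, prev, dic); i, prev are the Python ints of the loop, kept as Nat
-- (range(len) and prev = i+1 are nonnegative, exact); posting[prev:i] with prev ≤ i ≤ len is
-- (cs.drop prev).take (i - prev), exact for those slice bounds.
def pvStepA (cs : List Char) (st : String × Nat × PySem.Dict String Int) (i : Nat) :
    String × Nat × PySem.Dict String Int :=
  let (sel, prev, dic) := st
  let c := cs.getD i ' '
  if pvIsHex c then st
  else (String.ofList [c], i + 1, dic.insert sel (pvIntHex ((cs.drop prev).take (i - prev))))

def parse (posting : String) : List (String × Int) :=
  let cs := posting.toList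
  let st := (List.range cs.length).foldl (pvStepA cs) ("id", 0, PySem.Dict.empty)
  ((st.2.2).insert st.1 (pvIntHex (cs.drop st.2.1))).items

-- ===== PORT B =====
-- B's first loop: state (keys, segs, cur); segments kept as List Char (the char-list model of Python str).
def pvStepB (st : List String × List (List Char) × List Char) (c : Char) :
    List String × List (List Char) × List Char :=
  let (keys, segs, cur) := st
  if pvIsHex c then (keys, segs, cur ++ [c])
  else (keys ++ [String.ofList [c]], segs ++ [cur], [])

def parse_alt (posting : String) : List (String × Int) :=
  let (keys, segs, cur) := posting.toList.foldl pvStepB (["id"], [], [])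
  let segs := segs ++ [cur]
  ((keys.zip segs).foldl (fun (d : PySem.Dict String Int) p => d.insert p.1 (pvIntHex p.2))
    PySem.Dict.empty).items

-- ===== PRECONDITION & SPEC =====
-- Pre_ excludes exactly the inputs where Python A raises ValueError at int('', 16): the empty
-- string and any leading, trailing or adjacent non-hex marker (an empty segment).
def Pre_parse (posting : String) : Prop :=
  posting.toList ≠ [] ∧
  pvIsHex (posting.toList.headD ' ') = true ∧
  pvIsHex (posting.toList.getLastD ' ') = true ∧
  (posting.toList.zip posting.toList.tail).all (fun p => pvIsHex p.1 || pvIsHex p.2) = true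
instance (posting : String) : Decidable (Pre_parse posting) := by unfold Pre_parse; infer_instance

def pvWitness_parse : String := "1a2bx3c"

def Spec_parse (posting : String) (out : List (String × Int)) : Prop := out = parse_alt posting
instance (posting : String) (out : List (String × Int)) : Decidable (Spec_parse posting out) := by unfold Spec_parse; infer_instance

-- ===== CLAIM (what is proved, stated in full; the proofs are below) =====
def Claim_equal_parse : Prop := ∀ (posting : String), Dom_parse posting → Pre_parse posting → Spec_parse posting (parse posting)

-- ===== LEMMAS AND PROOFS =====

-- Common functional characterisation: the (key, segment) token list of the input.
def pvTokens (sel : String) (acc : List Char) : List Char → List (String × List Char)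
  | [] => [(sel, acc)]
  | c :: cs => if pvIsHex c then pvTokens sel (acc ++ [c]) cs
               else (sel, acc) :: pvTokens (String.ofList [c]) [] cs

def pvBuild (ts : List (String × List Char)) : PySem.Dict String Int :=
  ts.foldl (fun d p => d.insert p.1 (pvIntHex p.2)) PySem.Dict.empty

theorem pvA_loop (rest : List Char) : ∀ (cs : List Char) (p : Nat) (cur : List Char) (sel : String)
    (dic : PySem.Dict String Int), cs.drop p = cur ++ rest →
    (let st := (List.range' (p + cur.length) rest.length).foldl (pvStepA cs) (sel, p, dic)
     (st.2.2).insert st.1 (pvIntHex (cs.drop st.2.1)))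
    = (pvTokens sel cur rest).foldl (fun d q => d.insert q.1 (pvIntHex q.2)) dic := by
  induction rest with
  | nil =>
    intro cs p cur sel dic h
    simp [pvTokens, h]
  | cons c rest ih =>
    intro cs p cur sel dic h
    have hdropi : cs.drop (p + cur.length) = c :: rest := by
      have h2 := congrArg (List.drop cur.length) h
      rw [List.drop_drop] at h2
      simpa [Nat.add_comm] using h2
    have hget : cs.getD (p + cur.length) ' ' = c := by
      rw [List.getD_eq_getElem?_getD, ← List.head?_drop, hdropi]
      rfl
    simp only [List.length_cons]
    rw [List.range'_succ, List.foldl_cons]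
    by_cases hc : pvIsHex c = true
    · have hstep : pvStepA cs (sel, p, dic) (p + cur.length) = (sel, p, dic) := by
        unfold pvStepA
        dsimp only
        rw [hget, if_pos hc]
      rw [hstep]
      have h' : cs.drop p = (cur ++ [c]) ++ rest := by rw [h]; simp
      have := ih cs p (cur ++ [c]) sel dic h'
      rw [show p + cur.length + 1 = p + (cur ++ [c]).length by simp only [List.length_append, List.length_cons, List.length_nil]; omega]
      rw [this]
      simp [pvTokens, hc]
    · have hslice : (cs.drop p).take (p + cur.length - p) = cur := by
        rw [h, show p + cur.length - p = cur.length by omega]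
        exact List.take_left
      have hstep : pvStepA cs (sel, p, dic) (p + cur.length)
          = (String.ofList [c], p + cur.length + 1, dic.insert sel (pvIntHex cur)) := by
        unfold pvStepA
        dsimp only
        rw [hget, if_neg (by simp [hc]), hslice]
      rw [hstep]
      have h' : cs.drop (p + cur.length + 1) = [] ++ rest := by
        have h2 := congrArg (List.drop 1) hdropi
        rw [List.drop_drop] at h2
        simpa [Nat.add_comm] using h2
      have := ih cs (p + cur.length + 1) [] (String.ofList [c]) (dic.insert sel (pvIntHex cur)) h'
      simp only [List.length_nil, Nat.add_zero] at this
      rw [this]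
      simp [pvTokens, hc]

theorem pvA_eq_tokens (posting : String) :
    parse posting = (pvBuild (pvTokens "id" [] posting.toList)).items := by
  unfold parse pvBuild
  have h := pvA_loop posting.toList posting.toList 0 [] "id" PySem.Dict.empty (by simp)
  simp only [List.length_nil, Nat.add_zero] at h
  simp only [List.range_eq_range']
  exact congrArg PySem.Dict.items h

theorem pvB_loop (rest : List Char) : ∀ (keys : List String) (segs : List (List Char)) (sel : String)
    (cur : List Char), keys.length = segs.length →
    (let st := rest.foldl pvStepB (keys ++ [sel], segs, cur)
     st.1.zip (st.2.1 ++ [st.2.2]))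
    = keys.zip segs ++ pvTokens sel cur rest := by
  induction rest with
  | nil =>
    intro keys segs sel cur h
    simp [pvTokens, List.zip_append h]
  | cons c rest ih =>
    intro keys segs sel cur h
    by_cases hc : pvIsHex c = true
    · simp only [List.foldl_cons, pvStepB, hc, if_pos]
      rw [ih keys segs sel (cur ++ [c]) h]
      simp [pvTokens, hc]
    · simp only [List.foldl_cons, pvStepB, hc, if_neg, Bool.not_eq_true]
      rw [show keys ++ [sel] ++ [String.ofList [c]] = (keys ++ [sel]) ++ [String.ofList [c]] by simp]
      rw [ih (keys ++ [sel]) (segs ++ [cur]) (String.ofList [c]) [] (by simp [h])]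
      rw [List.zip_append h]
      simp [pvTokens, hc]

theorem pvB_eq_tokens (posting : String) :
    parse_alt posting = (pvBuild (pvTokens "id" [] posting.toList)).items := by
  unfold parse_alt pvBuild
  have := pvB_loop posting.toList [] [] "id" [] rfl
  simp only [List.nil_append, List.zip_nil_right] at this
  -- rewrite the zipped fold input by `this`
  rcases hst : posting.toList.foldl pvStepB (["id"], [], []) with ⟨keys, segs, cur⟩
  rw [hst] at this
  simp only at this ⊢
  rw [this]

-- ===== VERDICT (by name: the statement is the Claim_ definition above) =====
theorem parse_spec : Claim_equal_parse := by
  intro posting _ _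
  unfold Spec_parse
  rw [pvA_eq_tokens, pvB_eq_tokens]
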